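-- pv_equiv track=rewrite | github.com/AllAlgorithms/cpp | math/lucky_number.py | isLuckyNumber
-- ===== SOURCE A (Python) =====
-- def isLuckyNumber(n):
--     #
--     if n==1:
--         return True
--     if n&1==0:
--         return False
--
--     sieve  =list(range(1,n+1,2))
--     idx=1
--     while idx<len(sieve):
--         m=sieve[idx]
--         if m>len(sieve):
--             break
--         #last is n
--         if len(sieve)%m==0:
--             return False
--         sieve=[v for i,v in enumerate(sieve) if (i+1)%m!=0]
--         idx+=1
--     return True
-- ===== SOURCE B (Python) =====
-- def _survives(q, ms):
--     # position of odd q in the virtual sieve, pushed through the rounds done so far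
--     p = (q + 1) // 2
--     for m in ms:
--         if p % m == 0:
--             return False
--         p -= p // m
--     return True
--
--
-- def isLuckyNumber(n):
--     if n == 1:
--         return True
--     if n % 2 == 0:
--         return False
--     L = (n + 1) // 2      # n is the LAST element of the virtual sieve [1,3,...,n]; L = its length
--     ms = []               # round values m found so far (the surviving prefix of the sieve)
--     idx = 1
--     q = 3                 # next candidate for a round value
--     while idx < L:
--         while q <= n and not _survives(q, ms):
--             q += 2
--         if q > n:
--             break
--         m = q
--         if m > L:
--             break
--         if L % m == 0:
--             return False
--         L -= L // m
--         ms.append(m)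
--         idx += 1
--         q += 2
--     return True
-- ===== Notes on version B (the rewrite author's own statement) =====
-- stated objective: alternative
-- what changed: Instead of materialising the odd-number sieve list and rebuilding it every round, B tracks only n's position L, counting from one, in the virtual sieve (updating L -= L//m per round) and regenerates each round value m by a position-simulation survival test over the short list of previously found round values.
import Mathlib
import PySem

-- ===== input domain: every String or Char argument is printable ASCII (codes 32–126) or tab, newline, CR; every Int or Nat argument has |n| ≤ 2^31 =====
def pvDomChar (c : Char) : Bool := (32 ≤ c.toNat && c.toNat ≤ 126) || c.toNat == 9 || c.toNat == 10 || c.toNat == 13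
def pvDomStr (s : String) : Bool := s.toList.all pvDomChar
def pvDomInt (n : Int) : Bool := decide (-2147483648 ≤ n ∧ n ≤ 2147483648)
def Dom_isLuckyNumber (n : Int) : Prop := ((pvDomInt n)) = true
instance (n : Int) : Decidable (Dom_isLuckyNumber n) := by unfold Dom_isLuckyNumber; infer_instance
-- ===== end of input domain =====

-- B replaces A's repeatedly rebuilt sieve list by tracking only n's position L (counting from one) in
-- the virtual sieve (L -= L//m per round) and regenerating each round value m by a
-- position-simulation survival test on the small list of previous round values.

-- ===== PORT A =====
-- list(range(1, n+1, 2))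
def luckyOdds (n : Int) : List Int := PySem.List.pyRange 1 (n + 1) 2

-- [v for i, v in enumerate(sieve) if (i+1) % m != 0], with the running index spelled out
def luckyKeep (m i : Int) : List Int → List Int
  | [] => []
  | v :: rest =>
    if PySem.Int.mod (i + 1) m ≠ 0 then v :: luckyKeep m (i + 1) rest
    else luckyKeep m (i + 1) rest

-- the while loop of A; the fuel only makes it total (proved sufficient below), each
-- executed iteration strictly shrinks the sieve
def luckyLoopA : Nat → List Int → Int → Bool
  | 0, _, _ => true
  | fuel + 1, sieve, idx =>
    if idx < (sieve.length : Int) then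
      match PySem.List.pyGet? sieve idx with
      | none => true   -- unreachable: 0 ≤ idx < len(sieve) on every call
      | some m =>
        if m > (sieve.length : Int) then true
        else if PySem.Int.mod (sieve.length : Int) m = 0 then false
        else luckyLoopA fuel (luckyKeep m 0 sieve) (idx + 1)
    else true

def isLuckyNumber (n : Int) : Bool :=
  if n = 1 then true
  else if PySem.Int.band n 1 = 0 then false
  else
    let sieve := luckyOdds n
    luckyLoopA (sieve.length + 1) sieve 1

-- ===== PORT B =====
-- _survives(q, ms): push q's sieve position through the rounds done so far
def luckySurvivesGo (p : Int) : List Int → Bool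
  | [] => true
  | m :: rest =>
    if PySem.Int.mod p m = 0 then false
    else luckySurvivesGo (p - PySem.Int.floordiv p m) rest

def luckySurvives (q : Int) (ms : List Int) : Bool :=
  luckySurvivesGo (PySem.Int.floordiv (q + 1) 2) ms

-- the inner while: first candidate ≥ q that survives; none once q > n
def luckyFind (n : Int) (ms : List Int) (q : Int) : Option Int :=
  if q ≤ n then
    if luckySurvives q ms then some q else luckyFind n ms (q + 2)
  else none
termination_by (n + 1 - q).toNat
decreasing_by omega

-- the outer while loop of B; fuel only makes it total (idx grows towards L, which shrinks)
def luckyLoopB : Nat → Int → Int → Int → Int → List Int → Bool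
  | 0, _, _, _, _, _ => true
  | fuel + 1, n, L, idx, q, ms =>
    if idx < L then
      match luckyFind n ms q with
      | none => true
      | some m =>
        if m > L then true
        else if PySem.Int.mod L m = 0 then false
        else luckyLoopB fuel n (L - PySem.Int.floordiv L m) (idx + 1) (m + 2) (ms ++ [m])
    else true

def isLuckyNumber_alt (n : Int) : Bool :=
  if n = 1 then true
  else if PySem.Int.mod n 2 = 0 then false
  else
    let L := PySem.Int.floordiv (n + 1) 2
    luckyLoopB (L.toNat + 1) n L 1 3 []

-- ===== PRECONDITION & SPEC =====
def Spec_isLuckyNumber (n : Int) (out : Bool) : Prop := out = isLuckyNumber_alt n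
instance (n : Int) (out : Bool) : Decidable (Spec_isLuckyNumber n out) := by unfold Spec_isLuckyNumber; infer_instance

-- ===== CLAIM (what is proved, stated in full; the proofs are below) =====
def Claim_equal_isLuckyNumber : Prop := ∀ (n : Int), Dom_isLuckyNumber n → Spec_isLuckyNumber n (isLuckyNumber n)

-- ===== LEMMAS AND PROOFS =====

-- ---- Nat division helpers (divisor is a variable, so omega treats these divisions as atoms)
theorem luckyNatAddDivLe (a d m : Nat) : (a + d) / m ≤ a / m + d := by
  induction d with
  | zero => simp
  | succ d ih =>
    have h := Nat.succ_div (a := a + d) (b := m)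
    have e : a + (d + 1) = (a + d) + 1 := by omega
    rw [e, h]
    split_ifs <;> omega

theorem luckyKeep_cons (mN k : Nat) (v : Int) (rest : List Int) :
    luckyKeep (mN : Int) (k : Int) (v :: rest) =
      if (k + 1) % mN ≠ 0 then v :: luckyKeep (mN : Int) ((k + 1 : Nat) : Int) rest
      else luckyKeep (mN : Int) ((k + 1 : Nat) : Int) rest := by
  have hc : ((k : Int) + 1) = ((k + 1 : Nat) : Int) := by push_cast; ring
  simp only [luckyKeep, hc, PySem.Int.mod_natCast, ne_eq, Nat.cast_eq_zero]

theorem luckyKeep_sublist (m : Int) : ∀ (s : List Int) (i : Int), List.Sublist (luckyKeep m i s) s := by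
  intro s
  induction s with
  | nil => intro i; simp [luckyKeep]
  | cons v rest ih =>
    intro i
    simp only [luckyKeep]
    split_ifs
    · exact (ih (i + 1)).cons₂ v
    · exact (ih (i + 1)).cons v

theorem luckyKeep_length (mN : Nat) : ∀ (s : List Int) (k : Nat),
    (luckyKeep (mN : Int) (k : Int) s).length + (k + s.length) / mN = s.length + k / mN := by
  intro s
  induction s with
  | nil => intro k; simp [luckyKeep]
  | cons v rest ih =>
    intro k
    rw [luckyKeep_cons]
    have e1 : k + (v :: rest).length = k + 1 + rest.length := by simp; omega
    rw [e1]
    have ih1 := ih (k + 1)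
    have hsd := Nat.succ_div (a := k) (b := mN)
    have hdvd : mN ∣ k + 1 ↔ (k + 1) % mN = 0 := Nat.dvd_iff_mod_eq_zero
    split_ifs with h
    · rw [if_neg (fun hd => h (hdvd.mp hd))] at hsd
      simp only [List.length_cons]
      omega
    · rw [if_pos (hdvd.mpr (by simpa using h))] at hsd
      simp only [List.length_cons]
      omega

theorem luckyKeep_get_keep (mN : Nat) (hm : 2 ≤ mN) : ∀ (s : List Int) (k j : Nat),
    (k + j + 1) % mN ≠ 0 →
    (luckyKeep (mN : Int) (k : Int) s)[j + k / mN - (k + j + 1) / mN]? = s[j]? := by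
  intro s
  induction s with
  | nil => intro k j h; simp [luckyKeep]
  | cons v rest ih =>
    intro k j h
    rw [luckyKeep_cons]
    have hdvd : ∀ x : Nat, mN ∣ x ↔ x % mN = 0 := fun x => Nat.dvd_iff_mod_eq_zero
    cases j with
    | zero =>
      have h' : (k + 1) % mN ≠ 0 := by simpa using h
      have hsd := Nat.succ_div (a := k) (b := mN)
      rw [if_neg (fun hd => h' ((hdvd _).mp hd))] at hsd
      rw [if_pos h']
      have e0 : k + 0 + 1 = k + 1 := by omega
      rw [e0]
      have e : 0 + k / mN - (k + 1) / mN = 0 := by omega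
      rw [e]
      simp
    | succ j =>
      have e1 : k + (j + 1) + 1 = k + 1 + j + 1 := by omega
      rw [e1] at h ⊢
      have hsd := Nat.succ_div (a := k) (b := mN)
      have hsd2 := Nat.succ_div (a := k + 1 + j) (b := mN)
      rw [if_neg (fun hd => h ((hdvd _).mp hd))] at hsd2
      have hb := luckyNatAddDivLe (k + 1) j mN
      split_ifs with hk
      · rw [if_neg (fun hd => hk ((hdvd _).mp hd))] at hsd
        have ihx := ih (k + 1) j h
        have eE : j + 1 + k / mN - (k + 1 + j + 1) / mN
            = (j + (k + 1) / mN - (k + 1 + j + 1) / mN) + 1 := by omega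
        rw [eE, List.getElem?_cons_succ, List.getElem?_cons_succ]
        exact ihx
      · rw [if_pos ((hdvd _).mpr (by simpa using hk))] at hsd
        have ihx := ih (k + 1) j h
        have eE : j + 1 + k / mN - (k + 1 + j + 1) / mN
            = j + (k + 1) / mN - (k + 1 + j + 1) / mN := by omega
        rw [eE, List.getElem?_cons_succ]
        exact ihx

theorem luckyKeep_get_drop (mN : Nat) (hm : 2 ≤ mN) : ∀ (s : List Int) (k j : Nat) (v : Int),
    s.Nodup → s[j]? = some v → (k + j + 1) % mN = 0 → v ∉ luckyKeep (mN : Int) (k : Int) s := by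
  intro s
  induction s with
  | nil => intro k j v _ hv _; simp at hv
  | cons v0 rest ih =>
    intro k j v hnd hv h
    obtain ⟨hv0, hndr⟩ := List.nodup_cons.mp hnd
    rw [luckyKeep_cons]
    cases j with
    | zero =>
      simp only [List.getElem?_cons_zero, Option.some_inj] at hv
      have h' : (k + 1) % mN = 0 := by simpa using h
      rw [if_neg (by simpa using h')]
      intro hmem
      exact hv0 (hv ▸ (luckyKeep_sublist _ rest _).subset hmem)
    | succ j =>
      rw [List.getElem?_cons_succ] at hv
      have hvr : v ∈ rest := List.mem_of_getElem? hv
      have e1 : k + (j + 1) + 1 = k + 1 + j + 1 := by omega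
      rw [e1] at h
      have ihx := ih (k + 1) j v hndr hv h
      split_ifs with hk
      · intro hmem
        rcases List.mem_cons.mp hmem with rfl | hmem
        · exact hv0 hvr
        · exact ihx hmem
      · exact ihx

-- ---- position simulation (proof-side model of luckySurvivesGo, keeping the position)
def luckyPosGo (p : Int) : List Int → Option Int
  | [] => some p
  | m :: rest => if p % m = 0 then none else luckyPosGo (p - p / m) rest

def luckyPosOf (v : Int) (ms : List Int) : Option Int := luckyPosGo ((v + 1) / 2) ms

theorem luckyPosGo_append (m : Int) : ∀ (ms : List Int) (p : Int),
    luckyPosGo p (ms ++ [m]) =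
      (luckyPosGo p ms).bind (fun p' => if p' % m = 0 then none else some (p' - p' / m)) := by
  intro ms
  induction ms with
  | nil => intro p; simp [luckyPosGo]
  | cons m0 rest ih =>
    intro p
    simp only [List.cons_append, luckyPosGo]
    split_ifs <;> simp [ih]

theorem luckySurvivesGo_eq (ms : List Int) : ∀ (p : Int), 0 ≤ p → (∀ m ∈ ms, 1 ≤ m) →
    luckySurvivesGo p ms = (luckyPosGo p ms).isSome := by
  induction ms with
  | nil => intro p _ _; simp [luckySurvivesGo, luckyPosGo]
  | cons m0 rest ih =>
    intro p hp hms
    have hm0 : 1 ≤ m0 := hms m0 (by simp)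
    have h1 : PySem.Int.mod p m0 = p % m0 := PySem.Int.mod_eq_emod_of_pos (by omega)
    have h2 : PySem.Int.floordiv p m0 = p / m0 := PySem.Int.floordiv_eq_ediv_of_pos (by omega)
    simp only [luckySurvivesGo, luckyPosGo, h1, h2]
    split_ifs with h
    · simp
    · exact ih (p - p / m0) (by have := Int.ediv_le_self m0 hp; omega)
        (fun m hmm => hms m (by simp [hmm]))

theorem luckySurvives_eq (v : Int) (ms : List Int) (hv : 0 ≤ v) (hms : ∀ m ∈ ms, 1 ≤ m) :
    luckySurvives v ms = (luckyPosOf v ms).isSome := by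
  unfold luckySurvives luckyPosOf
  rw [PySem.Int.floordiv_eq_ediv_of_pos (by norm_num)]
  exact luckySurvivesGo_eq ms _ (Int.ediv_nonneg (by omega) (by norm_num)) hms

-- ---- the odd range
theorem luckyOdds_eq (n : Int) (hn : 0 < n) :
    luckyOdds n = (List.range ((n + 1) / 2).toNat).map (fun k : Nat => 1 + 2 * (k : Int)) := by
  unfold luckyOdds
  rw [PySem.List.pyRange_of_pos _ _ (by norm_num), if_pos (by omega : (1 : Int) < n + 1)]
  have h2 : (n + 1 - 1 + 2 - 1 : Int) = n + 1 := by ring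
  rw [h2]

theorem luckyOdds_get (n : Int) (hn : 0 < n) (j : Nat) (hj : j < ((n + 1) / 2).toNat) :
    (luckyOdds n)[j]? = some (1 + 2 * (j : Int)) := by
  rw [luckyOdds_eq n hn, List.getElem?_map, List.getElem?_range hj, Option.map_some]

theorem luckyOdds_length (n : Int) (hn : 0 < n) :
    (luckyOdds n).length = ((n + 1) / 2).toNat := by
  rw [luckyOdds_eq n hn]; simp

theorem luckyOdds_pairwise (n : Int) : (luckyOdds n).Pairwise (· < ·) := by
  by_cases hn : 0 < n
  · rw [luckyOdds_eq n hn]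
    refine List.pairwise_map.mpr ?_
    exact List.Pairwise.imp (fun h => by omega) List.pairwise_lt_range
  · have : luckyOdds n = [] := by
      unfold luckyOdds
      rw [PySem.List.pyRange_of_pos _ _ (by norm_num)]
      have : ¬ (1 : Int) < n + 1 := by omega
      simp [this]
    simp [this]

theorem luckyOdds_nodup (n : Int) : (luckyOdds n).Nodup :=
  (luckyOdds_pairwise n).imp (fun h => ne_of_lt h)

theorem luckyOdds_mem (n v : Int) : v ∈ luckyOdds n ↔ 1 ≤ v ∧ v ≤ n ∧ v % 2 = 1 := by
  unfold luckyOdds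
  rw [PySem.List.mem_pyRange_iff_of_pos (by norm_num)]
  constructor
  · rintro ⟨h1, h2, k, hk⟩; refine ⟨h1, by omega, by omega⟩
  · rintro ⟨h1, h2, h3⟩; exact ⟨h1, by omega, ⟨(v - 1) / 2, by omega⟩⟩

-- ---- sublist index comparison
theorem lucky_sublist_get_ge {t s : List Int} (h : List.Sublist t s) :
    ∀ (j : Nat) (v : Int), t[j]? = some v → ∃ i, j ≤ i ∧ s[i]? = some v := by
  induction h with
  | slnil => intro j v hv; simp at hv
  | cons a h ih =>
    intro j v hv
    obtain ⟨i, hi, hs⟩ := ih j v hv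
    exact ⟨i + 1, by omega, by simpa using hs⟩
  | cons₂ a h ih =>
    intro j v hv
    cases j with
    | zero => exact ⟨0, le_refl _, by simpa using hv⟩
    | succ j =>
      obtain ⟨i, hi, hs⟩ := ih j v (by simpa using hv)
      exact ⟨i + 1, by omega, by simpa using hs⟩

theorem lucky_nodup_get_inj {s : List Int} (h : s.Nodup) {i j : Nat} {v : Int}
    (hi : s[i]? = some v) (hj : s[j]? = some v) : i = j := by
  obtain ⟨hi', hiv⟩ := List.getElem?_eq_some_iff.mp hi
  obtain ⟨hj', hjv⟩ := List.getElem?_eq_some_iff.mp hj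
  exact (List.Nodup.getElem_inj_iff h).mp (hiv.trans hjv.symm)

-- ---- the invariant tying A's sieve to B's state
def LuckyInv (n : Int) (sieve ms : List Int) : Prop :=
  List.Sublist sieve (luckyOdds n) ∧
  (∀ m ∈ ms, 3 ≤ m) ∧
  (∀ (j : Nat) (v : Int), sieve[j]? = some v → luckyPosOf v ms = some ((j : Int) + 1)) ∧
  (∀ (v p : Int), v ∈ luckyOdds n → luckyPosOf v ms = some p →
      1 ≤ p ∧ sieve[(p - 1).toNat]? = some v)

theorem lucky_sieve_get_ge (n : Int) {sieve : List Int} (hsub : List.Sublist sieve (luckyOdds n))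
    (j : Nat) (v : Int) (hv : sieve[j]? = some v) : 1 + 2 * (j : Int) ≤ v := by
  obtain ⟨i, hij, hodds⟩ := lucky_sublist_get_ge hsub j v hv
  by_cases hn : 0 < n
  · have hi : i < ((n + 1) / 2).toNat := by
      by_contra hc
      rw [List.getElem?_eq_none (by rw [luckyOdds_length n hn]; omega)] at hodds
      simp at hodds
    rw [luckyOdds_get n hn i hi] at hodds
    have : v = 1 + 2 * (i : Int) := by exact (Option.some_inj.mp hodds).symm
    omega
  · exfalso
    have : luckyOdds n = [] := by
      unfold luckyOdds
      rw [PySem.List.pyRange_of_pos _ _ (by norm_num)]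
      have : ¬ (1 : Int) < n + 1 := by omega
      simp [this]
    rw [this] at hodds; simp at hodds

-- ---- the round step preserves the invariant
theorem lucky_step (n : Int) (sieve ms : List Int) (m : Int)
    (hinv : LuckyInv n sieve ms) (hm : sieve[ms.length + 1]? = some m) :
    LuckyInv n (luckyKeep m 0 sieve) (ms ++ [m]) ∧
    (luckyKeep m 0 sieve)[ms.length + 1]? = some m := by
  obtain ⟨hsub, hms3, hfwd, hbwd⟩ := hinv
  have hnodup : sieve.Nodup := List.Sublist.nodup hsub (luckyOdds_nodup n)
  have hge := lucky_sieve_get_ge n hsub (ms.length + 1) m hm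
  have hm3 : 3 ≤ m := by push_cast at hge; omega
  set mN := m.toNat with hmNdef
  have hmN2 : 2 ≤ mN := by omega
  have hmcast : ((mN : Nat) : Int) = m := Int.toNat_of_nonneg (by omega)
  have hkeepeq : luckyKeep ((mN : Nat) : Int) (((0 : Nat)) : Int) sieve = luckyKeep m 0 sieve := by
    rw [hmcast]; norm_num
  have hksub : List.Sublist (luckyKeep m 0 sieve) sieve := luckyKeep_sublist m sieve 0
  have hknodup : (luckyKeep m 0 sieve).Nodup := List.Sublist.nodup hksub hnodup
  have hdivle : ∀ j : Nat, (j + 1) / mN ≤ j := by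
    intro j
    have h := Nat.div_le_div_left (c := 2) (a := j + 1) hmN2 (by omega)
    omega
  have hKgetK : ∀ (j : Nat) (v : Int), sieve[j]? = some v → (j + 1) % mN ≠ 0 →
      (luckyKeep m 0 sieve)[j - (j + 1) / mN]? = some v := by
    intro j v hj hne
    have h := luckyKeep_get_keep mN hmN2 sieve 0 j (by simpa using hne)
    rw [hkeepeq] at h
    simp only [Nat.zero_add, Nat.zero_div, Nat.add_zero] at h
    rw [h]; exact hj
  have hKdrop : ∀ (j : Nat) (v : Int), sieve[j]? = some v → (j + 1) % mN = 0 →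
      v ∉ luckyKeep m 0 sieve := by
    intro j v hj hz
    have h := luckyKeep_get_drop mN hmN2 sieve 0 j v hnodup hj (by simpa using hz)
    rwa [hkeepeq] at h
  have hposApp : ∀ (v : Int), luckyPosOf v (ms ++ [m]) =
      (luckyPosOf v ms).bind (fun p' => if p' % m = 0 then none else some (p' - p' / m)) := by
    intro v; unfold luckyPosOf; exact luckyPosGo_append m ms _
  have hmodcast : ∀ (j : Nat), ((j : Int) + 1) % m = (((j + 1) % mN : Nat) : Int) := by
    intro j; rw [← hmcast]; push_cast; ring_nf
  have hdivcast : ∀ (j : Nat), ((j : Int) + 1) / m = (((j + 1) / mN : Nat) : Int) := by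
    intro j; rw [← hmcast]; push_cast; ring_nf
  refine ⟨⟨List.Sublist.trans hksub hsub, ?_, ?_, ?_⟩, ?_⟩
  · intro x hx
    rcases List.mem_append.mp hx with hx | hx
    · exact hms3 x hx
    · simp only [List.mem_singleton] at hx; omega
  · -- forward: every element of the new sieve sits where the simulation says
    intro j' v hv'
    have hvmem : v ∈ luckyKeep m 0 sieve := List.mem_of_getElem? hv'
    obtain ⟨j, hjlt, hjv⟩ := List.getElem_of_mem (hksub.subset hvmem)
    have hgj : sieve[j]? = some v := by rw [List.getElem?_eq_getElem hjlt, hjv]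
    have hpos := hfwd j v hgj
    by_cases hjm : (j + 1) % mN = 0
    · exact absurd hvmem (hKdrop j v hgj hjm)
    · have hk := hKgetK j v hgj hjm
      have hle := hdivle j
      have hj' : j' = j - (j + 1) / mN := lucky_nodup_get_inj hknodup hv' hk
      rw [hposApp, hpos]
      simp only [Option.bind_some]
      rw [if_neg (by rw [hmodcast j]; exact_mod_cast hjm)]
      rw [hdivcast j]
      subst hj'
      congr 1
      omega
  · -- backward: surviving odd values are still where the simulation says
    intro v p hvodds hpos'
    rw [hposApp] at hpos'
    cases hold : luckyPosOf v ms with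
    | none => rw [hold] at hpos'; simp at hpos'
    | some p0 =>
      rw [hold] at hpos'
      simp only [Option.bind_some] at hpos'
      by_cases hz : p0 % m = 0
      · rw [if_pos hz] at hpos'; simp at hpos'
      · rw [if_neg hz] at hpos'
        have hp : p0 - p0 / m = p := Option.some_inj.mp hpos'
        obtain ⟨hp0pos, hget⟩ := hbwd v p0 hvodds hold
        set jN := (p0 - 1).toNat with hjN
        have hp0 : p0 = (jN : Int) + 1 := by omega
        have hmodne : (jN + 1) % mN ≠ 0 := by
          intro hc
          apply hz
          rw [hp0, hmodcast jN, hc]; simp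
        have hk := hKgetK jN v hget hmodne
        have hle := hdivle jN
        constructor
        · rw [← hp, hp0, hdivcast jN]; omega
        · have he : (p - 1).toNat = jN - (jN + 1) / mN := by
            rw [← hp, hp0, hdivcast jN]; omega
          rw [he]; exact hk
  · -- the round value m keeps its index
    have hmbig : ms.length + 1 + 1 < mN := by push_cast at hge; omega
    have hmodne : (ms.length + 1 + 1) % mN ≠ 0 := by
      rw [Nat.mod_eq_of_lt hmbig]; omega
    have hk := hKgetK (ms.length + 1) m hm hmodne
    rwa [Nat.div_eq_of_lt hmbig, Nat.sub_zero] at hk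

-- ---- luckyFind returns exactly the next sieve element
theorem lucky_find_eq (n : Int) (ms : List Int) (tgt : Int) (htn : tgt ≤ n)
    (hs : luckySurvives tgt ms = true) :
    ∀ (d : Nat) (q : Int), (tgt - q).toNat ≤ d → q ≤ tgt → (tgt - q) % 2 = 0 →
    (∀ q', q ≤ q' → q' < tgt → (q' - q) % 2 = 0 → luckySurvives q' ms = false) →
    luckyFind n ms q = some tgt := by
  intro d
  induction d with
  | zero =>
    intro q hd hqt _ _
    have hq : q = tgt := by omega
    subst hq
    rw [luckyFind, if_pos htn, if_pos hs]
  | succ d ih =>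
    intro q hd hqt hpar hskip
    by_cases hq : q = tgt
    · subst hq; rw [luckyFind, if_pos htn, if_pos hs]
    · have hlt : q < tgt := lt_of_le_of_ne hqt hq
      have hsf : luckySurvives q ms = false := hskip q le_rfl hlt (by omega)
      rw [luckyFind, if_pos (by omega : q ≤ n), if_neg (by simp [hsf])]
      exact ih (q + 2) (by omega) (by omega) (by omega)
        (fun q' h1 h2 h3 => hskip q' (by omega) h2 (by omega))

-- ---- main loop equivalence
theorem lucky_loop_eq : ∀ (fA fB : Nat) (n q : Int) (sieve ms : List Int),
    LuckyInv n sieve ms →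
    sieve[ms.length]? = some (q - 2) →
    sieve.length < fA → sieve.length < fB →
    luckyLoopA fA sieve ((ms.length : Int) + 1) =
      luckyLoopB fB n (sieve.length : Int) ((ms.length : Int) + 1) q ms := by
  intro fA
  induction fA with
  | zero => intro fB n q sieve ms _ _ hA _; omega
  | succ fA ih =>
    intro fB n q sieve ms hinv hprev hA hB
    obtain ⟨fB', rfl⟩ : ∃ fB', fB = fB' + 1 := ⟨fB - 1, by omega⟩
    simp only [luckyLoopA, luckyLoopB]
    by_cases hidx : ((ms.length : Int) + 1) < (sieve.length : Int)
    case neg => rw [if_neg hidx, if_neg hidx]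
    case pos =>
      rw [if_pos hidx, if_pos hidx]
      have hobt := hinv
      obtain ⟨hsub, hms3, hfwd, hbwd⟩ := hinv
      have hpw : sieve.Pairwise (· < ·) := List.Pairwise.sublist hsub (luckyOdds_pairwise n)
      have hlt : ms.length + 1 < sieve.length := by omega
      have hltp : ms.length < sieve.length := by omega
      have hm : sieve[ms.length + 1]? = some (sieve[ms.length + 1]'hlt) :=
        List.getElem?_eq_getElem hlt
      set m := sieve[ms.length + 1]'hlt with hmdef
      have hixcast : ((ms.length : Int) + 1) = (((ms.length + 1 : Nat)) : Int) := by
        push_cast; ring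
      rw [hixcast, PySem.List.pyGet?_natCast, hm]
      have hqv : sieve[ms.length]'hltp = q - 2 := by
        have h0 := hprev
        rw [List.getElem?_eq_getElem hltp] at h0
        exact Option.some_inj.mp h0
      have hql : q - 2 < m := by
        have h1 := List.pairwise_iff_getElem.mp hpw ms.length (ms.length + 1) hltp hlt
          (by omega)
        rw [hqv] at h1
        exact h1
      have hmodds := (luckyOdds_mem n m).mp (hsub.subset (List.mem_of_getElem? hm))
      have hprevodds := (luckyOdds_mem n (q - 2)).mp (hsub.subset (List.mem_of_getElem? hprev))
      have hms1 : ∀ x ∈ ms, (1 : Int) ≤ x := fun x hx => by have := hms3 x hx; omega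
      have hsurvm : luckySurvives m ms = true := by
        rw [luckySurvives_eq m ms (by omega) hms1, hfwd (ms.length + 1) m hm]
        rfl
      have hskip : ∀ q', q ≤ q' → q' < m → (q' - q) % 2 = 0 →
          luckySurvives q' ms = false := by
        intro q' h1 h2 h3
        by_contra hc
        have hc' : luckySurvives q' ms = true := by
          cases hx : luckySurvives q' ms
          · exact absurd hx hc
          · rfl
        have hq'odds : q' ∈ luckyOdds n := by
          rw [luckyOdds_mem]
          exact ⟨by omega, by omega, by omega⟩
        rw [luckySurvives_eq q' ms (by omega) hms1] at hc'
        cases hpos : luckyPosOf q' ms with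
        | none => rw [hpos] at hc'; simp at hc'
        | some p =>
          obtain ⟨hppos, hgetq'⟩ := hbwd q' p hq'odds hpos
          set j2 := (p - 1).toNat with hj2
          obtain ⟨hj2lt, hj2v⟩ := List.getElem?_eq_some_iff.mp hgetq'
          rcases Nat.lt_or_ge j2 (ms.length + 1) with hcase | hcase
          · have hle : q' ≤ q - 2 := by
              rcases Nat.lt_or_ge j2 ms.length with hc2 | hc2
              · have h4 := List.pairwise_iff_getElem.mp hpw j2 ms.length hj2lt hltp hc2
                rw [hqv, hj2v] at h4
                omega
              · have he : j2 = ms.length := by omega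
                rw [he] at hgetq'
                rw [hprev] at hgetq'
                have := Option.some_inj.mp hgetq'
                omega
            omega
          · have hge2 : m ≤ q' := by
              rcases Nat.lt_or_ge (ms.length + 1) j2 with hc2 | hc2
              · have h4 := List.pairwise_iff_getElem.mp hpw (ms.length + 1) j2 hlt hj2lt hc2
                rw [hj2v] at h4
                omega
              · have he : j2 = ms.length + 1 := by omega
                rw [he] at hgetq'
                rw [hm] at hgetq'
                have := Option.some_inj.mp hgetq'
                omega
            omega
      have hfind : luckyFind n ms q = some m :=
        lucky_find_eq n ms m (by omega) hsurvm ((m - q).toNat) q (by omega) (by omega)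
          (by omega) hskip
      rw [hfind]
      simp only []
      by_cases hbig : m > (sieve.length : Int)
      · rw [if_pos hbig, if_pos hbig]
      · rw [if_neg hbig, if_neg hbig]
        by_cases hmod : PySem.Int.mod ((sieve.length : Int)) m = 0
        · rw [if_pos hmod, if_pos hmod]
        · rw [if_neg hmod, if_neg hmod]
          have hstep := lucky_step n sieve ms m hobt hm
          set mN := m.toNat with hmNdef
          have hmcast : ((mN : Nat) : Int) = m := Int.toNat_of_nonneg (by omega)
          have hkeepeq : luckyKeep ((mN : Nat) : Int) (((0 : Nat)) : Int) sieve
              = luckyKeep m 0 sieve := by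
            rw [hmcast]; norm_num
          have hlenk := luckyKeep_length mN sieve 0
          rw [hkeepeq] at hlenk
          simp only [Nat.zero_add, Nat.zero_div, Nat.add_zero] at hlenk
          have hdivpos : 1 ≤ sieve.length / mN := by
            rw [Nat.one_le_div_iff (by omega)]
            omega
          have hfloor : PySem.Int.floordiv ((sieve.length : Int)) m
              = ((sieve.length / mN : Nat) : Int) := by
            rw [← hmcast, PySem.Int.floordiv_natCast]
          have hlencast : (sieve.length : Int) - PySem.Int.floordiv ((sieve.length : Int)) m
              = (((luckyKeep m 0 sieve).length : Nat) : Int) := by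
            rw [hfloor]
            omega
          have hprev' : (luckyKeep m 0 sieve)[(ms ++ [m]).length]? = some ((m + 2) - 2) := by
            have h5 := hstep.2
            simp only [List.length_append, List.length_cons, List.length_nil]
            have he : (m + 2) - 2 = m := by ring
            rw [he]
            exact h5
          have hidxc : (((ms.length + 1 : Nat)) : Int) + 1 = (((ms ++ [m]).length : Nat) : Int) + 1 := by
            simp
          rw [hlencast, hidxc]
          exact ih fB' n (m + 2) (luckyKeep m 0 sieve) (ms ++ [m]) hstep.1 hprev'
            (by omega) (by omega)

-- ===== VERDICT (by name: the statement is the Claim_ definition above) =====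
theorem isLuckyNumber_spec : Claim_equal_isLuckyNumber := by
  intro n _
  unfold Spec_isLuckyNumber
  simp only [isLuckyNumber, isLuckyNumber_alt]
  by_cases h1 : n = 1
  · simp [h1]
  · rw [if_neg h1, if_neg h1, PySem.Int.band_one]
    by_cases h2 : PySem.Int.mod n 2 = 0
    · rw [if_pos h2, if_pos h2]
    · rw [if_neg h2, if_neg h2]
      have hm2 : PySem.Int.mod n 2 = n % 2 := PySem.Int.mod_eq_emod_of_pos (by norm_num)
      have hodd : n % 2 = 1 := by rw [hm2] at h2; omega
      have hfd : PySem.Int.floordiv (n + 1) 2 = (n + 1) / 2 :=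
        PySem.Int.floordiv_eq_ediv_of_pos (by norm_num)
      by_cases h3 : 3 ≤ n
      · -- the real sieve case
        have hlen : (luckyOdds n).length = ((n + 1) / 2).toNat := luckyOdds_length n (by omega)
        have hL : PySem.Int.floordiv (n + 1) 2 = ((luckyOdds n).length : Int) := by
          rw [hfd, hlen]; omega
        have hinv : LuckyInv n (luckyOdds n) [] := by
          refine ⟨List.Sublist.refl _, by simp, ?_, ?_⟩
          · intro j v hv
            have hjlt : j < ((n + 1) / 2).toNat := by
              have h6 := (List.getElem?_eq_some_iff.mp hv).1
              omega
            rw [luckyOdds_get n (by omega) j hjlt] at hv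
            have hveq : v = 1 + 2 * (j : Int) := (Option.some_inj.mp hv).symm
            unfold luckyPosOf luckyPosGo
            congr 1
            omega
          · intro v p hvm hp
            unfold luckyPosOf luckyPosGo at hp
            have hpe : p = (v + 1) / 2 := (Option.some_inj.mp hp).symm
            obtain ⟨hv1, hv2, hv3⟩ := (luckyOdds_mem n v).mp hvm
            have hk : (p - 1).toNat < ((n + 1) / 2).toNat := by omega
            refine ⟨by omega, ?_⟩
            rw [luckyOdds_get n (by omega) _ hk]
            congr 1
            omega
        have hprev0 : (luckyOdds n)[([] : List Int).length]? = some (3 - 2) := by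
          have h0 : (0 : Nat) < ((n + 1) / 2).toNat := by omega
          simp only [List.length_nil]
          rw [luckyOdds_get n (by omega) 0 h0]
          norm_num
        have hmain := lucky_loop_eq ((luckyOdds n).length + 1) ((luckyOdds n).length + 1)
          n 3 (luckyOdds n) [] hinv hprev0 (by omega) (by omega)
        simp only [List.length_nil, Nat.cast_zero, zero_add] at hmain
        rw [hL]
        simp only [Int.toNat_natCast]
        exact hmain
      · -- n odd, n ≠ 1, n < 3: the sieve is empty and L ≤ 0, both loops exit at once
        have hn1 : n ≤ -1 := by omega
        have hodds : luckyOdds n = [] := by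
          unfold luckyOdds
          rw [PySem.List.pyRange_of_pos _ _ (by norm_num)]
          have hx : ¬ (1 : Int) < n + 1 := by omega
          simp [hx]
        have ht : (PySem.Int.floordiv (n + 1) 2).toNat = 0 := by rw [hfd]; omega
        have hLneg : ¬ (1 : Int) < PySem.Int.floordiv (n + 1) 2 := by rw [hfd]; omega
        rw [hodds, ht]
        simp only [List.length_nil]
        simp only [luckyLoopA, luckyLoopB]
        rw [if_neg (by norm_num : ¬ (1 : Int) < (([] : List Int).length : Int)),
          if_neg hLneg]
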